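-- pv_equiv track=rewrite | github.com/agentnya/astrbot_plugin_mnemosyne | core/tools.py | remove_system_content
-- ===== SOURCE A (Python) =====
-- from typing import List, Dict, Set, Union
--
-- def remove_system_content(
--     contents: List[Dict[str, str]], contexts_memory_len: int = 0
-- ) -> List[Dict[str, str]]:
--     """
--     FromLLMremove older system prompts in the context ('role'='system' messages)，
--     retain a specified number of the latest system messages，and maintain the overall message order。
--     """
--     if not isinstance(contents, list):
--         return []
--     if contexts_memory_len < 0:
--         return contents
--
--     system_message_indices = [
--         i for i, msg in enumerate(contents)
--         if isinstance(msg, dict) and msg.get("role") == "system"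
--     ]
--     indices_to_remove: Set[int] = set()
--     num_system_messages = len(system_message_indices)
--
--     if num_system_messages > contexts_memory_len:
--         num_to_remove = num_system_messages - contexts_memory_len
--         indices_to_remove = set(system_message_indices[:num_to_remove])
--
--     cleaned_contents = [
--         msg for i, msg in enumerate(contents) if i not in indices_to_remove
--     ]
--
--     return cleaned_contents
-- ===== SOURCE B (Python) =====
-- def remove_system_content(contents, contexts_memory_len=0):
--     if not isinstance(contents, list):
--         return []
--     if contexts_memory_len < 0:
--         return contents
--     result = []
--     kept = 0
--     for msg in reversed(contents):
--         if isinstance(msg, dict) and msg.get("role") == "system":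
--             if kept < contexts_memory_len:
--                 kept += 1
--                 result.append(msg)
--         else:
--             result.append(msg)
--     result.reverse()
--     return result
-- ===== Notes on version B (the rewrite author's own statement) =====
-- stated objective: alternative
-- what changed: A makes two forward passes (collect all system-message indices, then filter by a set of the oldest ones); B makes a single backward traversal that keeps a system message only while a keep-quota of the latest contexts_memory_len is unspent, then reverses - no counting pass, no index list, no set.
import Mathlib
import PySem

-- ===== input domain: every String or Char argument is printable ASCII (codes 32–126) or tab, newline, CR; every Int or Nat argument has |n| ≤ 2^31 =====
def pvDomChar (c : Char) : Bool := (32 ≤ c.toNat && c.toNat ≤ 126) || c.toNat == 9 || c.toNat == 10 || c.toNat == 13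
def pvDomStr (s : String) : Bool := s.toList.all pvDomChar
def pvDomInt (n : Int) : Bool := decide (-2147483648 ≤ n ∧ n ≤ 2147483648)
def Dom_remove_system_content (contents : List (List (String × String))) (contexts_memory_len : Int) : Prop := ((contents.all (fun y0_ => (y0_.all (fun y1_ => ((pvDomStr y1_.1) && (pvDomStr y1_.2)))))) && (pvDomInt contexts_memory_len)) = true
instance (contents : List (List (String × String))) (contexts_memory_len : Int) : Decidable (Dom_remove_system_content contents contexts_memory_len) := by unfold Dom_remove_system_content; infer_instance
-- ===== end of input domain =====

-- B replaces A's two forward passes (index list + index set) with a single backward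
-- traversal keeping the latest system messages under a quota (objective: alternative).


-- msg.get("role") == "system": association-list lookup, first match (exact for a dict,
-- whose keys are unique); the isinstance checks of the Python are vacuous under the type
-- convention (contents is a list, every element a dict).
def pvIsSys (msg : List (String × String)) : Bool := msg.lookup "role" == some "system"

-- ===== PORT A =====
def remove_system_content (contents : List (List (String × String))) (contexts_memory_len : Int) : List (List (String × String)) :=
  if contexts_memory_len < 0 then contents
  else
    let system_message_indices : List Int :=
      ((PySem.List.enumerate contents).filter (fun p => pvIsSys p.2)).map (·.1)
    let num_system_messages : Int := system_message_indices.length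
    let indices_to_remove : PySem.Set Int :=
      if num_system_messages > contexts_memory_len then
        PySem.Set.ofList
          (PySem.List.slice system_message_indices none (some (num_system_messages - contexts_memory_len)))
      else PySem.Set.empty
    ((PySem.List.enumerate contents).filter
      (fun p => !(PySem.Set.contains indices_to_remove p.1))).map (·.2)

-- ===== PORT B =====
-- Source B's backward loop: walk the reversed list; a system message is kept only while
-- the quota (kept < L) is unspent; result is in traversal order (Python's appends),
-- reversed at the end by the caller.
def pvKeepRev (L : Int) (msgs : List (List (String × String))) (kept : Int) : List (List (String × String)) :=
  match msgs with
  | [] => []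
  | m :: rest =>
      if pvIsSys m then
        if kept < L then m :: pvKeepRev L rest (kept + 1) else pvKeepRev L rest kept
      else m :: pvKeepRev L rest kept

def remove_system_content_alt (contents : List (List (String × String))) (contexts_memory_len : Int) : List (List (String × String)) :=
  if contexts_memory_len < 0 then contents
  else (pvKeepRev contexts_memory_len contents.reverse 0).reverse

-- ===== PRECONDITION & SPEC =====
def Spec_remove_system_content (contents : List (List (String × String))) (contexts_memory_len : Int) (out : List (List (String × String))) : Prop := out = remove_system_content_alt contents contexts_memory_len
instance (contents : List (List (String × String))) (contexts_memory_len : Int) (out : List (List (String × String))) : Decidable (Spec_remove_system_content contents contexts_memory_len out) := by unfold Spec_remove_system_content; infer_instance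

-- ===== CLAIM (what is proved, stated in full; the proofs are below) =====
def Claim_equal_remove_system_content : Prop := ∀ (contents : List (List (String × String))) (contexts_memory_len : Int), Dom_remove_system_content contents contexts_memory_len → Spec_remove_system_content contents contexts_memory_len (remove_system_content contents contexts_memory_len)

-- ===== LEMMAS AND PROOFS =====

-- proof-side middle form: drop the first k system messages, keep everything else
def pvSkip (k : Int) (contents : List (List (String × String))) : List (List (String × String)) :=
  match contents with
  | [] => []
  | m :: rest => if k > 0 && pvIsSys m then pvSkip (k - 1) rest else m :: pvSkip k rest

def pvSysCount (l : List (List (String × String))) : Int := ((l.filter pvIsSys).length : Int)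

-- system-message indices of `l` enumerated from offset `n`
def pvSysIdx (n : Int) (l : List (List (String × String))) : List Int :=
  ((PySem.List.enumerate l n).filter (fun p => pvIsSys p.2)).map (·.1)

theorem pvSysIdx_cons (n : Int) (m : List (String × String)) (l : List (List (String × String))) :
    pvSysIdx n (m :: l) = if pvIsSys m then n :: pvSysIdx (n + 1) l else pvSysIdx (n + 1) l := by
  simp only [pvSysIdx, PySem.List.enumerate_cons, List.filter_cons]
  split_ifs <;> simp_all

theorem pvSysIdx_length (n : Int) (l : List (List (String × String))) :
    (pvSysIdx n l).length = (l.filter pvIsSys).length := by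
  induction l generalizing n with
  | nil => simp [pvSysIdx]
  | cons m rest ih =>
    rw [pvSysIdx_cons, List.filter_cons]
    split_ifs with h <;> simp [ih]

theorem pvSysIdx_ge (n : Int) (l : List (List (String × String))) :
    ∀ i ∈ pvSysIdx n l, n ≤ i := by
  induction l generalizing n with
  | nil => simp [pvSysIdx]
  | cons m rest ih =>
    rw [pvSysIdx_cons]
    intro i hi
    split_ifs at hi with h
    · rw [List.mem_cons] at hi
      rcases hi with rfl | hi
      · omega
      · have := ih (n + 1) i hi; omega
    · have := ih (n + 1) i hi; omega

theorem pvContains_ofList (xs : List Int) (x : Int) :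
    PySem.Set.contains (PySem.Set.ofList xs) x = decide (x ∈ xs) := by
  simp [PySem.Set.contains, PySem.Set.mem_ofList]

-- A's filter-by-index-set equals the drop-first-k form
theorem pvMain (l : List (List (String × String))) (n : Int) (k : Nat) :
    ((PySem.List.enumerate l n).filter
        (fun p => !decide (p.1 ∈ (pvSysIdx n l).take k))).map (·.2)
      = pvSkip (k : Int) l := by
  induction l generalizing n k with
  | nil => simp [pvSkip, PySem.List.enumerate]
  | cons m rest ih =>
    rw [PySem.List.enumerate_cons, List.filter_cons]
    have tail_ne : ∀ p ∈ PySem.List.enumerate rest (n + 1), (p.1 : Int) ≠ n := by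
      intro p hp
      rw [PySem.List.mem_enumerate_iff] at hp
      obtain ⟨j, hj, rfl⟩ := hp
      simp; omega
    by_cases hm : pvIsSys m
    · cases k with
      | zero =>
        simp only [List.take_zero, List.not_mem_nil, decide_false, Bool.not_false, if_pos]
        rw [List.filter_congr (q := fun _ => true) (by intro p _; simp)]
        rw [List.filter_true, List.map_cons, PySem.List.map_snd_enumerate]
        have h0 := ih (n + 1) 0
        simp only [List.take_zero, Nat.cast_zero] at h0
        rw [List.filter_congr (q := fun _ => true) (by intro p _; simp), List.filter_true,
          PySem.List.map_snd_enumerate] at h0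
        show m :: rest = pvSkip ((0 : Nat) : Int) (m :: rest)
        rw [Nat.cast_zero, pvSkip, if_neg (by simp)]
        exact congrArg _ h0
      | succ j =>
        rw [pvSysIdx_cons, if_pos hm]
        simp only [List.take_succ_cons]
        rw [if_neg (by simp)]
        rw [List.filter_congr
          (q := fun p => !decide (p.1 ∈ (pvSysIdx (n + 1) rest).take j))
          (by
            intro p hp
            have hne := tail_ne p hp
            simp [List.mem_cons, hne])]
        rw [ih (n + 1) j]
        have : pvSkip ((j + 1 : Nat) : Int) (m :: rest) = pvSkip ((j : Nat) : Int) rest := by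
          rw [pvSkip]
          rw [if_pos (by simp [hm])]
          congr 1
          omega
        rw [this]
    · rw [pvSysIdx_cons, if_neg hm]
      have hhead : (n : Int) ∉ (pvSysIdx (n + 1) rest).take k := by
        intro hmem
        have := pvSysIdx_ge (n + 1) rest n (List.mem_of_mem_take hmem)
        omega
      rw [if_pos (by simp [hhead])]
      rw [List.map_cons, ih (n + 1) k]
      rw [show pvSkip ((k : Nat) : Int) (m :: rest) = m :: pvSkip k rest from by
        rw [pvSkip, if_neg (by simp [hm])]]

theorem pvSysCount_cons (m : List (String × String)) (l : List (List (String × String))) :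
    pvSysCount (m :: l) = if pvIsSys m then pvSysCount l + 1 else pvSysCount l := by
  simp only [pvSysCount, List.filter_cons]
  split_ifs <;> simp

theorem pvSysCount_nonneg (l : List (List (String × String))) : 0 ≤ pvSysCount l := by
  simp [pvSysCount]

-- pvSkip distributes over append: the residual counter after l1 is max 0 (k - count l1)
theorem pvSkip_max0 (l : List (List (String × String))) (k : Int) :
    pvSkip (max 0 k) l = pvSkip k l := by
  induction l generalizing k with
  | nil => rfl
  | cons m rest ih =>
    simp only [pvSkip]
    by_cases hm : pvIsSys m
    · by_cases hk : k > 0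
      · rw [if_pos (by simp [hm]; omega), if_pos (by simp [hm, hk]),
          show max 0 k - 1 = max 0 (k - 1) from by omega, ih]
      · rw [if_neg (by simp [hm]; omega), if_neg (by simp [hk]),
          show (max 0 k) = max 0 k from rfl]
        exact congrArg _ (by rw [show max 0 k = max 0 (max 0 k) from by omega, ih, ih])
    · rw [if_neg (by simp [hm]), if_neg (by simp [hm])]
      exact congrArg _ (ih k)

theorem pvSkip_append (l1 l2 : List (List (String × String))) (k : Int) :
    pvSkip k (l1 ++ l2) = pvSkip k l1 ++ pvSkip (max 0 (k - pvSysCount l1)) l2 := by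
  induction l1 generalizing k with
  | nil =>
    simp only [List.nil_append, pvSkip, pvSysCount, List.filter_nil, List.length_nil]
    rw [show max 0 (k - ((0:Nat):Int)) = max 0 k from by omega, pvSkip_max0]
  | cons m rest ih =>
    simp only [List.cons_append, pvSkip, pvSysCount_cons]
    by_cases hm : pvIsSys m
    · by_cases hk : k > 0
      · rw [if_pos (by simp [hm, hk]), if_pos (by simp [hm, hk]), ih, if_pos hm]
        congr 2
        omega
      · rw [if_neg (by simp [hk]), if_neg (by simp [hk]), List.cons_append, ih, if_pos hm]
        have h0 := pvSysCount_nonneg rest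
        congr 3
        omega
    · rw [if_neg (by simp [hm]), if_neg (by simp [hm]), List.cons_append, ih, if_neg hm]

-- once the counter covers every system message, its exact value is irrelevant
theorem pvSkip_ge (l : List (List (String × String))) (k1 k2 : Int)
    (h1 : pvSysCount l ≤ k1) (h2 : pvSysCount l ≤ k2) : pvSkip k1 l = pvSkip k2 l := by
  induction l generalizing k1 k2 with
  | nil => rfl
  | cons m rest ih =>
    rw [pvSysCount_cons] at h1 h2
    have h0 := pvSysCount_nonneg rest
    simp only [pvSkip]
    by_cases hm : pvIsSys m
    · rw [if_pos hm] at h1 h2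
      rw [if_pos (by simp [hm]; omega), if_pos (by simp [hm]; omega)]
      exact ih _ _ (by omega) (by omega)
    · rw [if_neg hm] at h1 h2
      rw [if_neg (by simp [hm]), if_neg (by simp [hm])]
      exact congrArg _ (ih _ _ h1 h2)

-- B's backward quota-keep, reversed, equals the drop-first-k form on the reversed list
theorem pvKeepRev_eq_skip (l : List (List (String × String))) (L c : Int)
    (hc : 0 ≤ c) :
    (pvKeepRev L l c).reverse = pvSkip (max 0 (pvSysCount l - (L - c))) l.reverse := by
  induction l generalizing c with
  | nil => simp [pvKeepRev, pvSkip]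
  | cons m rest ih =>
    have hcnt := pvSysCount_nonneg rest
    have hrev : pvSysCount rest.reverse = pvSysCount rest := by
      simp [pvSysCount, List.filter_reverse]
    rw [List.reverse_cons, pvSysCount_cons, pvSkip_append, hrev]
    simp only [pvKeepRev]
    by_cases hm : pvIsSys m
    · rw [if_pos hm, if_pos hm]
      by_cases hkept : c < L
      · rw [if_pos hkept, List.reverse_cons, ih (c + 1) (by omega)]
        have hk : max 0 (pvSysCount rest + 1 - (L - c)) = max 0 (pvSysCount rest - (L - (c + 1))) := by omega
        rw [hk]
        congr 1
        have hsmall : max 0 (pvSysCount rest - (L - (c + 1))) - pvSysCount rest ≤ 0 := by omega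
        rw [show max 0 (max 0 (pvSysCount rest - (L - (c + 1))) - pvSysCount rest) = 0 from by omega]
        simp [pvSkip, hm]
      · rw [if_neg hkept, ih c hc]
        have hres : max 0 (max 0 (pvSysCount rest + 1 - (L - c)) - pvSysCount rest) > 0 := by omega
        rw [show pvSkip (max 0 (max 0 (pvSysCount rest + 1 - (L - c)) - pvSysCount rest)) [m]
              = [] from by simp [pvSkip, hm]; omega]
        rw [List.append_nil]
        exact pvSkip_ge _ _ _ (by omega) (by omega)
    · rw [if_neg hm, if_neg hm, List.reverse_cons, ih c hc]
      congr 1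
      simp [pvSkip, hm]

-- A equals the drop-first-k form (for non-negative contexts_memory_len)
theorem pvA_eq_skip (contents : List (List (String × String))) (L : Int) (hL : ¬ L < 0) :
    remove_system_content contents L
      = pvSkip (max 0 (pvSysCount contents - L)) contents := by
  unfold remove_system_content
  simp only [if_neg hL]
  have hidx : (((PySem.List.enumerate contents 0).filter (fun p => pvIsSys p.2)).map (·.1))
      = pvSysIdx 0 contents := rfl
  rw [hidx]
  set num : Int := ((pvSysIdx 0 contents).length : Int) with hnum
  have hnumc : num = pvSysCount contents := by
    rw [hnum, pvSysIdx_length]; rfl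
  by_cases hgt : num > L
  · rw [if_pos hgt]
    have ht : (0 : Int) ≤ num - L := by omega
    rw [PySem.List.slice_to _ ht]
    have hmax : max 0 (pvSysCount contents - L) = (((num - L).toNat : Nat) : Int) := by omega
    rw [hmax, ← pvMain contents 0 (num - L).toNat]
    apply congrArg
    apply List.filter_congr
    intro p _
    rw [pvContains_ofList]
  · rw [if_neg hgt]
    have hmax : max 0 (pvSysCount contents - L) = ((0 : Nat) : Int) := by simp; omega
    rw [hmax, ← pvMain contents 0 0]
    apply congrArg
    apply List.filter_congr
    intro p _
    simp [PySem.Set.empty, PySem.Set.contains]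

-- ===== VERDICT (by name: the statement is the Claim_ definition above) =====
theorem remove_system_content_spec : Claim_equal_remove_system_content := by
  intro contents L _
  unfold Spec_remove_system_content remove_system_content_alt
  by_cases hneg : L < 0
  · unfold remove_system_content
    rw [if_pos hneg, if_pos hneg]
  · rw [if_neg hneg, pvA_eq_skip contents L hneg,
      pvKeepRev_eq_skip contents.reverse L 0 le_rfl, List.reverse_reverse]
    congr 2
    simp [pvSysCount]
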